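/- GENERATED by tools/mkfinal.gif.py (the `allCode` fields from Gif/ClosedSpec.lean; the rest is the script's template, made from
   Toyh/Final.lean) — re-run it when the units change.
  THE END THEOREM OF THE GIFLIB DECODER: from the unit theorems to `ProgX.StaysInCode Gif.image`.

      image                  the `ProgX.Image` of the theorems: the file `imageBytes` (c/gif/gif.bin, Gif/Image.lean) with this build's symbols
      text_of                the image is linked for the base's text record `ProgX.Base.T`
      image_isNat            the whole file, as the number, is in the start state's memory
      baseIn                 THE IMAGE CONTAINS THE BASE (version 2, with the heap): ONE kernel-decided equality; with it the code of all
                             41 proved base functions is in the start state (`allCode_of_baseIn`)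
      allCode                `Gif.Closed.AllCode` of the start state: the program's functions (one `FileHas` each, `by decide +kernel`) and the
                             two base functions the program's units are about
      imageData              `.init_array` and the descriptor table are in the file
      consts_start           THE IMAGE'S CONSTANTS (`Gif.Spec.Consts`: `CodeMasks`, `InterlacedOffset`, `InterlacedJumps`) are in the start
                             state's memory: closed facts about the file's bytes. The decoder's safety needs their VALUES, and the
                             platform's `Top.StartOK` / `Top.MainPre` say nothing about the contents of the image's data: so the stub's
                             statement of this program (Gif/Spec/Units/start.lean) takes `Consts` of the start state as a hypothesis, and
                             `stays_in_code_of` discharges it here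
      stays_in_code_of       THE ASSEMBLY, with the units as hypotheses: the base's closed contracts, the program's (`hclosed`), the stub (`hstub`)
-/
import ProgX.Base.ImageFacts
import Gif.ClosedSpec
import Gif.Image
import Gif.Spec.Units.start
namespace Gif
open X86 X86.User Asan ProgX

set_option exponentiation.threshold 2000000

/-! ### The image -/

/-- **The image of the theorems**: the bytes of c/gif/gif.bin with this build's symbols. -/
noncomputable def image : ProgX.Image := symbols.image imageBytes

/-- The image of this build, for any file bytes, is linked for the base's text record. -/
theorem text_of (bytes : Array UInt8) : ProgX.Base.T.Of (symbols.image bytes) :=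
  ⟨rfl, rfl, rfl⟩

/-- What link.ld asserts, for this build's symbols and any file of `n` bytes. -/
theorem image_ok_of (bytes : Array UInt8) (n : Nat) (hsize : bytes.size = n)
    (h1 : 0x100000 + n ≤ symbols.image_end) (h2 : symbols.image_end ≤ 0x1F0000)
    (h3 : ProgX.Base.symbols.text_cap ≤ 0x100000 + n) (h4 : 0x100000 ≤ ProgX.Base.symbols.text_cap) :
    (symbols.image bytes).OK := by
  subst hsize
  exact ⟨h1, h2, h3, h4⟩

/-- `ImageIsNat` for this build's symbols and any file with the two facts the generated Gif/Image.lean proves of `imageBytes`. -/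
theorem image_isNat_of (bytes : Array UInt8) (N sz : Nat) (hok : (symbols.image bytes).OK) (hsize : bytes.size = sz)
    (hnat : ∀ {mem : Mem} {base : Word}, CodeAt mem base bytes.toList → CodeNat mem base N sz) :
    ImageIsNat (symbols.image bytes) N sz :=
  ImageIsNat.of_bytes hok hsize hnat

/-- **What link.ld asserts holds of the image.** -/
theorem image_ok : image.OK :=
  image_ok_of imageBytes imageNat.size imageBytes_size (by decide) (by decide) (by decide) (by decide)

/-- **The whole file, as the number, is in the start state's memory from 100000H.** -/
theorem image_isNat : ImageIsNat image imageNat imageNat.size :=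
  image_isNat_of imageBytes imageNat imageNat.size image_ok imageBytes_size imageBytes_codeNat

/-! ### The code -/

/-- **The image contains the base**: the 20,480 bytes from 100000H are the base's text. -/
theorem baseIn : ProgX.Base.BaseIn imageNat imageNat.size := by
  decide +kernel

/-- **The code of every function a unit of the program is about is in the start state.** -/
theorem allCode (c : Nat) (hc : c = 0 ∨ c = 3) (inp : List UInt8) :
    Closed.AllCode (startLayout c hc) (startU image c inp) where
  DGifBufferedInput := image_hasCode image_isNat c hc inp _ _ _ (by decide +kernel)
  DGifCloseFile := image_hasCode image_isNat c hc inp _ _ _ (by decide +kernel)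
  DGifDecompressInput := image_hasCode image_isNat c hc inp _ _ _ (by decide +kernel)
  DGifDecompressLine := image_hasCode image_isNat c hc inp _ _ _ (by decide +kernel)
  DGifDecreaseImageCounter := image_hasCode image_isNat c hc inp _ _ _ (by decide +kernel)
  DGifGetCodeNext := image_hasCode image_isNat c hc inp _ _ _ (by decide +kernel)
  DGifGetExtensionNext := image_hasCode image_isNat c hc inp _ _ _ (by decide +kernel)
  DGifGetExtension := image_hasCode image_isNat c hc inp _ _ _ (by decide +kernel)
  DGifGetImageDesc := image_hasCode image_isNat c hc inp _ _ _ (by decide +kernel)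
  DGifGetImageHeader := image_hasCode image_isNat c hc inp _ _ _ (by decide +kernel)
  DGifGetLine := image_hasCode image_isNat c hc inp _ _ _ (by decide +kernel)
  DGifGetPrefixChar := image_hasCode image_isNat c hc inp _ _ _ (by decide +kernel)
  DGifGetRecordType := image_hasCode image_isNat c hc inp _ _ _ (by decide +kernel)
  DGifGetScreenDesc := image_hasCode image_isNat c hc inp _ _ _ (by decide +kernel)
  DGifGetWord := image_hasCode image_isNat c hc inp _ _ _ (by decide +kernel)
  DGifOpen := image_hasCode image_isNat c hc inp _ _ _ (by decide +kernel)
  DGifSetupDecompress := image_hasCode image_isNat c hc inp _ _ _ (by decide +kernel)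
  DGifSlurp := image_hasCode image_isNat c hc inp _ _ _ (by decide +kernel)
  GifAddExtensionBlock := image_hasCode image_isNat c hc inp _ _ _ (by decide +kernel)
  GifBitSize := image_hasCode image_isNat c hc inp _ _ _ (by decide +kernel)
  GifFreeExtensions := image_hasCode image_isNat c hc inp _ _ _ (by decide +kernel)
  GifFreeMapObject := image_hasCode image_isNat c hc inp _ _ _ (by decide +kernel)
  GifFreeSavedImages := image_hasCode image_isNat c hc inp _ _ _ (by decide +kernel)
  GifMakeMapObject := image_hasCode image_isNat c hc inp _ _ _ (by decide +kernel)
  digest_byte := image_hasCode image_isNat c hc inp _ _ _ (by decide +kernel)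
  digest_bytes := image_hasCode image_isNat c hc inp _ _ _ (by decide +kernel)
  digest_extensions := image_hasCode image_isNat c hc inp _ _ _ (by decide +kernel)
  digest_int := image_hasCode image_isNat c hc inp _ _ _ (by decide +kernel)
  digest_map := image_hasCode image_isNat c hc inp _ _ _ (by decide +kernel)
  gif_decode := image_hasCode image_isNat c hc inp _ _ _ (by decide +kernel)
  mem_read := image_hasCode image_isNat c hc inp _ _ _ (by decide +kernel)
  openbsd_reallocarray := image_hasCode image_isNat c hc inp _ _ _ (by decide +kernel)
  prog_main := image_hasCode image_isNat c hc inp _ _ _ (by decide +kernel)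
  strncmp := image_hasCode image_isNat c hc inp _ _ _ (by decide +kernel)
  sub_I_65535_1 := image_hasCode image_isNat c hc inp _ _ _ (by decide +kernel)
  InternalRead := image_hasCode image_isNat c hc inp _ _ _ (by decide +kernel)
  digest_file := image_hasCode image_isNat c hc inp _ _ _ (by decide +kernel)
  run_ctors := ProgX.Base.hasCode_of_baseIn image_isNat baseIn c hc inp ProgX.Base.baseHas_run_ctors
  asan_register_globals := ProgX.Base.hasCode_of_baseIn image_isNat baseIn c hc inp ProgX.Base.baseHas_asan_register_globals

/-! ### The data -/

/-- `.init_array` as numbers: one entry; the file has the address of `_sub_I_65535_1` there. -/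
theorem ctor_numbers :
    Spec.rt.sym.initArrayEnd = Spec.rt.sym.initArrayStart + 8 ∧
    FileHas imageNat imageNat.size Spec.rt.sym.initArrayStart 8 Spec.rt.sym.ctor.toNat := by
  decide +kernel

/-- The descriptor table as numbers: the three quadwords of descriptor `i` in the file (eight descriptors). -/
theorem descs_numbers : ∀ i (h : i < Spec.rt.descs.length),
    FileHas imageNat imageNat.size (Spec.rt.table + 64 * i) 8 Spec.rt.descs[i].beg ∧
    FileHas imageNat imageNat.size (Spec.rt.table + 64 * i + 8) 8 Spec.rt.descs[i].size ∧
    FileHas imageNat imageNat.size (Spec.rt.table + 64 * i + 16) 8 Spec.rt.descs[i].sizeRz := by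
  decide +kernel

/-- The slots of the globals lie inside the image. -/
theorem descs_in_image : ∀ d, d ∈ Spec.rt.descs → d.beg + d.sizeRz ≤ (image.imageEnd + 7) / 8 * 8 := by
  decide

/-- **What the composition needs to know about the image's data.** -/
theorem imageData : Top.ImageData Spec.rt image where
  ok := image_ok
  descs_ok := Globals.descs_ok
  descs_apart := Globals.descs_apart
  descs_in := descs_in_image
  ctor := ctorIn_of image_isNat Spec.rt.sym ctor_numbers.1 ctor_numbers.2
  descs := descsIn_of image_isNat Spec.rt.table Spec.rt.descs descs_numbers

/-- The thirteen code masks, the four interlace offsets and the four interlace jumps, as the file has them. -/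
theorem consts_numbers :
    (∀ k, k ≤ 12 → FileHas imageNat imageNat.size (0x141380 + 2 * k) 2 (2 ^ k - 1)) ∧
    (FileHas imageNat imageNat.size 0x141340 4 0 ∧ FileHas imageNat imageNat.size 0x141344 4 4 ∧
      FileHas imageNat imageNat.size 0x141348 4 2 ∧ FileHas imageNat imageNat.size 0x14134c 4 1) ∧
    (FileHas imageNat imageNat.size 0x141300 4 8 ∧ FileHas imageNat imageNat.size 0x141304 4 8 ∧
      FileHas imageNat imageNat.size 0x141308 4 4 ∧ FileHas imageNat imageNat.size 0x14130c 4 2) := by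
  decide +kernel

/-- **The image's constants are in the start state's memory** (`Gif.Spec.Consts`): what the file has at `CodeMasks`,
`InterlacedOffset`, `InterlacedJumps`. -/
theorem consts_start (c : Nat) (inp : List UInt8) : Spec.Consts (startU image c inp).mem := by
  obtain ⟨k1, k2, k3⟩ := consts_numbers
  refine ⟨?_, ?_, ?_⟩
  · intro k hk
    exact image_readLE image_isNat c inp _ 2 _ (k1 k hk)
  · exact ⟨image_readLE image_isNat c inp _ 4 _ k2.1, image_readLE image_isNat c inp _ 4 _ k2.2.1,
      image_readLE image_isNat c inp _ 4 _ k2.2.2.1, image_readLE image_isNat c inp _ 4 _ k2.2.2.2⟩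
  · exact ⟨image_readLE image_isNat c inp _ 4 _ k3.1, image_readLE image_isNat c inp _ 4 _ k3.2.1,
      image_readLE image_isNat c inp _ 4 _ k3.2.2.1, image_readLE image_isNat c inp _ 4 _ k3.2.2.2⟩

/-! ### The assembly -/

/-- **THE END THEOREM, from the units.** `hclosed`: the bottom-up composition of the program's units over the base's closed
contracts (Gif/Closed.lean; with the leaves as hypotheses: Gif/Assembly.lean); `hstub`: the stub's unit, whose statement takes the
start state's `Consts` as a hypothesis (Gif/Spec/Units/start.lean): discharged with `consts_start`. -/
theorem stays_in_code_of
    (hclosed : ∀ (Lay : Layout) (_ : Lay.hi = 0x1000000) (μ : Microarch) (_ : UserX.MicroOK μ) (u₀ : State),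
      Closed.AllCode Lay u₀ → ProgX.Base.Closed.Contracts Lay μ u₀ → Closed.Contracts Lay μ u₀)
    (hstub : Spec.start.Statement) : ProgX.StaysInCode image := by
  apply StaysInCode.of_reachVia
  intro μ hμ c hc inp hfit
  have hLay := startLayout_hi c hc
  have hbase := ProgX.Base.Closed.closed (startLayout c hc) hLay μ hμ (startU image c inp)
    (ProgX.Base.allCode_of_baseIn image_isNat baseIn c hc inp)
  have hprog := hclosed (startLayout c hc) hLay μ hμ (startU image c inp) (allCode c hc inp) hbase
  have hstart := ProgX.Base.hasCode_of_baseIn image_isNat baseIn c hc inp ProgX.Base.baseHas_start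
  have hreach := hstub (startLayout c hc) hLay μ hμ (startU image c inp) hstart hprog.run_ctors hprog.prog_main_COMPOSITION
    inp.length (startU image c inp) (Top.startOK imageData c hc inp hfit) (consts_start c inp) (Mem.EqOn.refl _ _ _)
  exact hreach.weaken (fun v hv => (wayInv_iff (text_of imageBytes) v).mp hv)

end Gif
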